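-- pv_equiv track=rewrite | github.com/SaarShai/Primes-Equispaced | experiments/primorials_analysis.py | is_primorial
-- ===== SOURCE A (Python) =====
-- def is_primorial(n):
--     """Check if n is a primorial 2, 6, 30, 210, 2310, ..."""
--     primes = [2, 3, 5, 7, 11, 13, 17, 19, 23, 29, 31]
--     p = 1
--     for prime in primes:
--         p *= prime
--         if p == n:
--             return True
--         if p > n:
--             return False
--     return False
-- ===== SOURCE B (Python) =====
-- _PRIMORIALS = frozenset({2, 6, 30, 210, 2310, 30030, 510510,
--                          9699690, 223092870, 6469693230, 200560490130})
--
-- def is_primorial(n):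
--     """Check if n is a primorial 2, 6, 30, 210, 2310, ..."""
--     return n in _PRIMORIALS
-- ===== Notes on version B (the rewrite author's own statement) =====
-- stated objective: simpler
-- what changed: Replaces the iterative cumulative-product loop with early exit by a one-line membership test against a precomputed frozenset of every primorial A can recognise (products of primes up to 31).
import Mathlib
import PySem

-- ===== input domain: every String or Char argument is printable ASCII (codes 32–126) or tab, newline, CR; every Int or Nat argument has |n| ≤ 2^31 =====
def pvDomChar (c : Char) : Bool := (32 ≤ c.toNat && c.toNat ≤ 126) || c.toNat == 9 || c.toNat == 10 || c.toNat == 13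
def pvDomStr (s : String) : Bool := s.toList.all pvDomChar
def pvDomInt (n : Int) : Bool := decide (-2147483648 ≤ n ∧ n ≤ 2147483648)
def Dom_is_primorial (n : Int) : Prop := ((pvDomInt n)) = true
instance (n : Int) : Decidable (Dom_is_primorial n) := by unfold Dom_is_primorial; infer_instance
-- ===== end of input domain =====

-- B replaces A's cumulative-product loop (with early exit) by a membership test in the precomputed set of primorials (objective: simpler).

-- ===== PORT A =====
-- the for-loop with early return: some true / some false = the loop returned, none = the loop ran off the end
def isPrimorialLoop (n : Int) : List Int → Int → Option Bool
  | [], _ => none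
  | prime :: rest, p =>
    let p' := p * prime
    if p' = n then some true
    else if p' > n then some false
    else isPrimorialLoop n rest p'

def is_primorial (n : Int) : Bool :=
  (isPrimorialLoop n [2, 3, 5, 7, 11, 13, 17, 19, 23, 29, 31] 1).getD false

-- ===== PORT B =====
def primorialSet : PySem.Set Int :=
  PySem.Set.ofList [2, 6, 30, 210, 2310, 30030, 510510, 9699690, 223092870, 6469693230, 200560490130]

def is_primorial_alt (n : Int) : Bool := primorialSet.contains n

-- ===== PRECONDITION & SPEC =====
def Spec_is_primorial (n : Int) (out : Bool) : Prop := out = is_primorial_alt n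
instance (n : Int) (out : Bool) : Decidable (Spec_is_primorial n out) := by unfold Spec_is_primorial; infer_instance

-- ===== CLAIM (what is proved, stated in full; the proofs are below) =====
def Claim_equal_is_primorial : Prop := ∀ (n : Int), Dom_is_primorial n → Spec_is_primorial n (is_primorial n)

-- ===== LEMMAS AND PROOFS =====

-- the cumulative products the loop compares n against
def cumprods (p : Int) : List Int → List Int
  | [] => []
  | x :: xs => (p * x) :: cumprods (p * x) xs

theorem loop_cons (n prime p : Int) (rest : List Int) :
    isPrimorialLoop n (prime :: rest) p =
      (if p * prime = n then some true
       else if p * prime > n then some false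
       else isPrimorialLoop n rest (p * prime)) := rfl

-- if n is none of the cumulative products, the loop never returns true
theorem loop_false (n : Int) (l : List Int) (p : Int)
    (h : n ∉ cumprods p l) : (isPrimorialLoop n l p).getD false = false := by
  induction l generalizing p with
  | nil => rfl
  | cons x xs ih =>
    rw [loop_cons]
    simp only [cumprods, List.mem_cons, not_or] at h
    rw [if_neg (fun hx => h.1 hx.symm)]
    by_cases hgt : p * x > n
    · rw [if_pos hgt]; rfl
    · rw [if_neg hgt]; exact ih _ h.2

theorem primorialSet_eq :
    primorialSet = [2, 6, 30, 210, 2310, 30030, 510510, 9699690, 223092870, 6469693230, 200560490130] := by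
  decide

theorem alt_iff (n : Int) :
    is_primorial_alt n = true ↔
      n ∈ ([2, 6, 30, 210, 2310, 30030, 510510, 9699690, 223092870, 6469693230, 200560490130] : List Int) := by
  rw [is_primorial_alt, primorialSet_eq]
  simp [PySem.Set.contains]

theorem cumprods_eq :
    cumprods 1 [2, 3, 5, 7, 11, 13, 17, 19, 23, 29, 31] =
      [2, 6, 30, 210, 2310, 30030, 510510, 9699690, 223092870, 6469693230, 200560490130] := by
  norm_num [cumprods]

-- ===== VERDICT (by name: the statement is the Claim_ definition above) =====
theorem is_primorial_spec : Claim_equal_is_primorial := by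
  intro n _
  unfold Spec_is_primorial
  rcases Bool.eq_false_or_eq_true (is_primorial_alt n) with hb | hb <;> rw [hb]
  · have h := (alt_iff n).mp hb
    simp only [List.mem_cons, List.not_mem_nil, or_false] at h
    rcases h with h | h | h | h | h | h | h | h | h | h | h <;> subst h <;> decide
  · refine loop_false n _ 1 ?_
    rw [cumprods_eq]
    intro hmem
    rw [(alt_iff n).mpr hmem] at hb
    simp at hb
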